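-- pv_equiv track=rewrite | github.com/AbdelRayan/AutomaticSleepScoring | Andrei/.ipynb_checkpoints/utils-checkpoint.py | build_transition_dict
-- ===== SOURCE A (Python) =====
-- def build_transition_dict(simplified_states_sequence, include_self_loops=False):
--     """Take a simplified states sequence and build a dictionary for the state (and associated frequency) transitions.
--     This dictionary will contain no cycles by default (as we are working on the simplified sequence).
--     The count corresponds to how often a state transitions into another."""
--     transition_dict = {}
--     for idx in range(len(simplified_states_sequence) - 1):
--         cur_state, next_state = simplified_states_sequence[idx][0], simplified_states_sequence[idx + 1][0]
--         if cur_state in transition_dict: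
--             transition_dict[cur_state][next_state] = transition_dict[cur_state].get(next_state, 0) + 1
--         else:
--             transition_dict[cur_state] = {next_state: 1}
--
--     if include_self_loops:  # then we also add how often self transitions happen (inferred from the state duration)
--         for state, duration in simplified_states_sequence:
--             if duration > 1:  # then there is at least 1 self-transition
--                 if state in transition_dict:
--                     transition_dict[state][state] = transition_dict[state].get(state, 0) + duration - 1
--                 else:
--                     transition_dict[state] = {state: duration - 1}
--     for node, transitions in transition_dict.items():  # to also sort the transitions based on frequency
--         transition_dict[node] = dict(sorted(transitions.items(), key=lambda item: item[1], reverse=True))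
--     return transition_dict
-- ===== SOURCE B (Python) =====
-- def build_transition_dict(simplified_states_sequence, include_self_loops=False):
--     """Alternative decomposition: collect one flat list of weighted (cur, next) transition
--     events in a single pass (self-loops appended as weighted events), then group it: the
--     outer keys are the deduplicated source states in first-appearance order, and each
--     node's row is computed from the flat event list and sorted by frequency."""
--     seq = simplified_states_sequence
--     events = [((cur[0], nxt[0]), 1) for cur, nxt in zip(seq, seq[1:])]
--     if include_self_loops:
--         events += [((state, state), duration - 1) for state, duration in seq if duration > 1]
--     nodes = list(dict.fromkeys(key[0] for key, _ in events))
--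
--     def row(node):
--         targets = list(dict.fromkeys(key[1] for key, _ in events if key[0] == node))
--         counts = {t: sum(w for key, w in events if key == (node, t)) for t in targets}
--         return dict(sorted(counts.items(), key=lambda item: item[1], reverse=True))
--
--     return {node: row(node) for node in nodes}
-- ===== Notes on version B (the rewrite author's own statement) =====
-- stated objective: alternative
-- what changed: Replaces A's incrementally-built nested dict-of-dicts with a flat weighted transition-event list built in one pass (self-loops as weighted events) followed by a group-by pass: deduplicated source states in first-appearance order, per-node deduplicated targets with summed weights, then the same stable frequency sort.
import Mathlib
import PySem

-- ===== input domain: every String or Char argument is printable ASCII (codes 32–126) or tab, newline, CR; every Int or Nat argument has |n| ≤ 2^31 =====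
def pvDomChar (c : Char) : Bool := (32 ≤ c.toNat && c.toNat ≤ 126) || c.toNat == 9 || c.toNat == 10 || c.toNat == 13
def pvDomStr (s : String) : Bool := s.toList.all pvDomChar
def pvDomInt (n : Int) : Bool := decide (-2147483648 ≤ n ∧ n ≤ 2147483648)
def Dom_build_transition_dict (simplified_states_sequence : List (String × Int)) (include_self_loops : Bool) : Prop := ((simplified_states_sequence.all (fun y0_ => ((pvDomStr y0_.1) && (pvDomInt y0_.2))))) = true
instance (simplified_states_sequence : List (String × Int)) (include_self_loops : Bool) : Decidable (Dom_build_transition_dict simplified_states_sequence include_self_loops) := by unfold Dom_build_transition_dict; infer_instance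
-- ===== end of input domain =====

-- B re-decomposes A's incremental nested-dict build as: one flat weighted transition-event
-- list, then a group-by pass (dedup'd sources / dedup'd targets with summed weights), same
-- stable frequency sort per node; objective: alternative decomposition, not speed.

-- ===== PORT A =====
def build_transition_dict (simplified_states_sequence : List (String × Int)) (include_self_loops : Bool) : List (String × List (String × Int)) :=
  -- transition_dict = {}; for idx in range(len(simplified_states_sequence) - 1): ...
  let td : PySem.Dict String (PySem.Dict String Int) :=
    (PySem.List.pyRange 0 ((simplified_states_sequence.length : Int) - 1) 1).foldl (fun td idx =>
      let cur_state := (PySem.List.pyGetD simplified_states_sequence idx ("", 0)).1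
      let next_state := (PySem.List.pyGetD simplified_states_sequence (idx + 1) ("", 0)).1
      if td.contains cur_state then
        td.insert cur_state ((td.getD cur_state PySem.Dict.empty).insert next_state
          ((td.getD cur_state PySem.Dict.empty).getD next_state 0 + 1))
      else
        td.insert cur_state (PySem.Dict.empty.insert next_state 1)) PySem.Dict.empty
  -- if include_self_loops: for state, duration in simplified_states_sequence: ...
  let td :=
    if include_self_loops then
      simplified_states_sequence.foldl (fun td p =>
        if 1 < p.2 then
          if td.contains p.1 then
            td.insert p.1 ((td.getD p.1 PySem.Dict.empty).insert p.1
              ((td.getD p.1 PySem.Dict.empty).getD p.1 0 + p.2 - 1))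
          else
            td.insert p.1 (PySem.Dict.empty.insert p.1 (p.2 - 1))
        else td) td
    else td
  -- final loop reassigns every existing key in place (dict order unchanged): it is the map
  -- (p.1, dict(sorted(p.2.items(), key=item[1], reverse=True))) over the items; dict() of a
  -- list of distinct-keyed pairs is that list
  td.items.map (fun p => (p.1, PySem.List.sorted p.2.items (fun it => it.2) true))

-- ===== PORT B =====
def build_transition_dict_alt (simplified_states_sequence : List (String × Int)) (include_self_loops : Bool) : List (String × List (String × Int)) :=
  -- events = [((cur[0], nxt[0]), 1) for cur, nxt in zip(seq, seq[1:])] (+ weighted self-loops)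
  let events := (simplified_states_sequence.zip
      (PySem.List.slice simplified_states_sequence (some 1) none)).map
      (fun p => ((p.1.1, p.2.1), (1 : Int)))
  let events := events ++ (if include_self_loops then
      (simplified_states_sequence.filter (fun p => 1 < p.2)).map
        (fun p => ((p.1, p.1), p.2 - 1)) else [])
  -- nodes = list(dict.fromkeys(...)); dict.fromkeys is ordered dedup (PySem.List.dedup)
  let nodes := PySem.List.dedup (events.map (fun e => e.1.1))
  let row := fun (node : String) =>
    let targets := PySem.List.dedup ((events.filter (fun e => e.1.1 == node)).map (fun e => e.1.2))
    -- counts = {t: sum(...) for t in targets}; targets are distinct, so its items are this map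
    let counts := targets.map (fun t =>
      (t, ((events.filter (fun e => e.1 == (node, t))).map (fun e => e.2)).sum))
    PySem.List.sorted counts (fun it => it.2) true
  -- {node: row(node) for node in nodes}: nodes are distinct, so its items are this map
  nodes.map (fun node => (node, row node))

-- ===== PRECONDITION & SPEC =====
def Spec_build_transition_dict (simplified_states_sequence : List (String × Int)) (include_self_loops : Bool) (out : List (String × List (String × Int))) : Prop := out = build_transition_dict_alt simplified_states_sequence include_self_loops
instance (simplified_states_sequence : List (String × Int)) (include_self_loops : Bool) (out : List (String × List (String × Int))) : Decidable (Spec_build_transition_dict simplified_states_sequence include_self_loops out) := by unfold Spec_build_transition_dict; infer_instance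

-- ===== CLAIM (what is proved, stated in full; the proofs are below) =====
def Claim_equal_build_transition_dict : Prop := ∀ (simplified_states_sequence : List (String × Int)) (include_self_loops : Bool), Dom_build_transition_dict simplified_states_sequence include_self_loops → Spec_build_transition_dict simplified_states_sequence include_self_loops (build_transition_dict simplified_states_sequence include_self_loops)

-- ===== LEMMAS AND PROOFS =====
-- step shared by both loops of A
def pvAStep (td : PySem.Dict String (PySem.Dict String Int)) (c n : String) (w : Int) :
    PySem.Dict String (PySem.Dict String Int) :=
  if td.contains c then
    td.insert c ((td.getD c PySem.Dict.empty).insert n ((td.getD c PySem.Dict.empty).getD n 0 + w))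
  else
    td.insert c (PySem.Dict.empty.insert n w)

def pvEvents (seq : List (String × Int)) (incl : Bool) : List ((String × String) × Int) :=
  (seq.zip seq.tail).map (fun p => ((p.1.1, p.2.1), (1 : Int))) ++
    (if incl then (seq.filter (fun p => 1 < p.2)).map (fun p => ((p.1, p.1), p.2 - 1)) else [])

def pvFold (evs : List ((String × String) × Int)) : PySem.Dict String (PySem.Dict String Int) :=
  evs.foldl (fun td e => pvAStep td e.1.1 e.1.2 e.2) PySem.Dict.empty

def pvRow (evs : List ((String × String) × Int)) (c : String) : List (String × Int) :=
  (PySem.Set.ofList ((evs.filter (fun e => e.1.1 == c)).map (fun e => e.1.2))).map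
    (fun t => (t, ((evs.filter (fun e => e.1 == (c, t))).map (fun e => e.2)).sum))

def pvCanon (evs : List ((String × String) × Int)) : List (String × PySem.Dict String Int) :=
  (PySem.Set.ofList (evs.map (fun e => e.1.1))).map (fun c => (c, PySem.Dict.mk (pvRow evs c)))

-- zip-index lemma (list level)
theorem pvIdxLoop {α β : Type} (f : β → α → α → β) (dflt : α) :
    ∀ (xs : List α) (init : β),
      (List.range (xs.length - 1)).foldl (fun d i => f d (xs.getD i dflt) (xs.getD (i + 1) dflt)) init
        = (xs.zip xs.tail).foldl (fun d p => f d p.1 p.2) init := by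
  intro xs
  induction xs with
  | nil => intro init; simp
  | cons a t ih =>
    intro init
    cases t with
    | nil => simp
    | cons b t' =>
      simp only [List.length_cons, Nat.add_sub_cancel, List.range_succ_eq_map, List.foldl_cons,
        List.foldl_map, List.zip_cons_cons, List.tail_cons]
      have hfun : (fun (x : β) (y : Nat) => f x ((a :: b :: t').getD y.succ dflt) ((a :: b :: t').getD (y.succ + 1) dflt))
          = fun x y => f x ((b :: t').getD y dflt) ((b :: t').getD (y + 1) dflt) := by
        funext x y
        simp
      rw [hfun]
      have h := ih (f init a b)
      simp only [List.length_cons, Nat.add_sub_cancel, List.tail_cons] at h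
      simpa using h



theorem pvRangeCast (len : Nat) :
    PySem.List.pyRange 0 ((len : Int) - 1) 1 = List.map (fun (k : Nat) => (k : Int)) (List.range (len - 1)) := by
  rw [PySem.List.pyRange_one]
  have h : ((len : Int) - 1 - 0).toNat = len - 1 := by omega
  rw [h]
  simp

theorem pvAShape (seq : List (String × Int)) (incl : Bool) :
    build_transition_dict seq incl
      = (pvFold (pvEvents seq incl)).items.map
          (fun p => (p.1, PySem.List.sorted p.2.items (fun it => it.2) true)) := by
  have e1 : (PySem.List.pyRange 0 ((seq.length : Int) - 1) 1).foldl (fun td idx =>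
      let cur_state := (PySem.List.pyGetD seq idx ("", 0)).1
      let next_state := (PySem.List.pyGetD seq (idx + 1) ("", 0)).1
      if td.contains cur_state then
        td.insert cur_state ((td.getD cur_state PySem.Dict.empty).insert next_state
          ((td.getD cur_state PySem.Dict.empty).getD next_state 0 + 1))
      else
        td.insert cur_state (PySem.Dict.empty.insert next_state 1)) PySem.Dict.empty
      = ((seq.zip seq.tail).map (fun p => ((p.1.1, p.2.1), (1 : Int)))).foldl
          (fun td e => pvAStep td e.1.1 e.1.2 e.2) PySem.Dict.empty := by
    rw [pvRangeCast, List.foldl_map, List.foldl_map]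
    rw [List.foldl_ext _ (fun td (k : Nat) => pvAStep td (seq.getD k ("", 0)).1 (seq.getD (k + 1) ("", 0)).1 1)
      PySem.Dict.empty (fun td k _ => by
        have hc : ((k : Int) + 1) = ((k + 1 : Nat) : Int) := by push_cast; ring
        simp only [hc, PySem.List.pyGetD_natCast, pvAStep])]
    exact pvIdxLoop (fun td cur nxt => pvAStep td cur.1 nxt.1 1) ("", 0) seq PySem.Dict.empty
  have e2 : ∀ td0, (seq.foldl (fun td (p : String × Int) =>
        if 1 < p.2 then
          if td.contains p.1 then
            td.insert p.1 ((td.getD p.1 PySem.Dict.empty).insert p.1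
              ((td.getD p.1 PySem.Dict.empty).getD p.1 0 + p.2 - 1))
          else
            td.insert p.1 (PySem.Dict.empty.insert p.1 (p.2 - 1))
        else td) td0)
      = ((seq.filter (fun p => 1 < p.2)).map (fun p => ((p.1, p.1), p.2 - 1))).foldl
          (fun td e => pvAStep td e.1.1 e.1.2 e.2) td0 := by
    intro td0
    rw [List.foldl_map, List.foldl_filter]
    congr 1
    funext td p
    by_cases h : (1:Int) < p.2
    · simp only [h, decide_true, if_pos, pvAStep, add_sub_assoc]
    · simp [h]
  show (List.map (fun p => (p.1, PySem.List.sorted p.2.items (fun it => it.2) true))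
      (if incl then (seq.foldl (fun td (p : String × Int) =>
        if 1 < p.2 then
          if td.contains p.1 then
            td.insert p.1 ((td.getD p.1 PySem.Dict.empty).insert p.1
              ((td.getD p.1 PySem.Dict.empty).getD p.1 0 + p.2 - 1))
          else
            td.insert p.1 (PySem.Dict.empty.insert p.1 (p.2 - 1))
        else td)
        ((PySem.List.pyRange 0 ((seq.length : Int) - 1) 1).foldl (fun td idx =>
          let cur_state := (PySem.List.pyGetD seq idx ("", 0)).1
          let next_state := (PySem.List.pyGetD seq (idx + 1) ("", 0)).1
          if td.contains cur_state then
            td.insert cur_state ((td.getD cur_state PySem.Dict.empty).insert next_state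
              ((td.getD cur_state PySem.Dict.empty).getD next_state 0 + 1))
          else
            td.insert cur_state (PySem.Dict.empty.insert next_state 1)) PySem.Dict.empty))
       else ((PySem.List.pyRange 0 ((seq.length : Int) - 1) 1).foldl (fun td idx =>
          let cur_state := (PySem.List.pyGetD seq idx ("", 0)).1
          let next_state := (PySem.List.pyGetD seq (idx + 1) ("", 0)).1
          if td.contains cur_state then
            td.insert cur_state ((td.getD cur_state PySem.Dict.empty).insert next_state
              ((td.getD cur_state PySem.Dict.empty).getD next_state 0 + 1))
          else
            td.insert cur_state (PySem.Dict.empty.insert next_state 1)) PySem.Dict.empty)).items)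
    = _
  rw [e1]
  unfold pvFold pvEvents
  rw [List.foldl_append]
  cases incl with
  | false => simp
  | true => rw [e2]; simp

theorem pvBShape (seq : List (String × Int)) (incl : Bool) :
    build_transition_dict_alt seq incl
      = (pvCanon (pvEvents seq incl)).map
          (fun p => (p.1, PySem.List.sorted p.2.items (fun it => it.2) true)) := by
  unfold build_transition_dict_alt pvCanon pvEvents pvRow
  rw [PySem.List.slice_from_one]
  simp only [PySem.List.dedup, List.map_map]
  rfl

theorem pvAddOfMem {α : Type} [BEq α] [LawfulBEq α] (s : PySem.Set α) (x : α) (h : x ∈ s) :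
    s.add x = s := by
  simp [PySem.Set.add, List.contains_eq_mem, h]

theorem pvAddOfNotMem {α : Type} [BEq α] [LawfulBEq α] (s : PySem.Set α) (x : α) (h : ¬ x ∈ s) :
    s.add x = s ++ [x] := by
  simp [PySem.Set.add, List.contains_eq_mem, h]

theorem pvOfListSnoc {α : Type} [BEq α] (xs : List α) (x : α) :
    PySem.Set.ofList (xs ++ [x]) = (PySem.Set.ofList xs).add x := by
  rw [PySem.Set.ofList_append]; rfl

theorem pvFilterNil1 (l : List ((String × String) × Int)) (c : String)
    (hc : ¬ c ∈ l.map (fun e => e.1.1)) : l.filter (fun e => e.1.1 == c) = [] := by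
  rw [List.filter_eq_nil_iff]
  intro e he
  simp only [beq_iff_eq]
  intro h
  exact hc (List.mem_map.mpr ⟨e, he, h⟩)

theorem pvFilterNil2 (l : List ((String × String) × Int)) (c t : String)
    (hc : ¬ c ∈ l.map (fun e => e.1.1)) : l.filter (fun e => e.1 == (c, t)) = [] := by
  rw [List.filter_eq_nil_iff]
  intro e he
  simp only [beq_iff_eq]
  intro h
  exact hc (List.mem_map.mpr ⟨e, he, by rw [h]⟩)

theorem pvFilterNil2' (l : List ((String × String) × Int)) (c n : String)
    (hn : ¬ n ∈ (l.filter (fun e => e.1.1 == c)).map (fun e => e.1.2)) :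
    l.filter (fun e => e.1 == (c, n)) = [] := by
  rw [List.filter_eq_nil_iff]
  intro e he
  simp only [beq_iff_eq]
  intro h
  exact hn (List.mem_map.mpr ⟨e, List.mem_filter.mpr ⟨he, by simp [h]⟩, by rw [h]⟩)

theorem pvRowSnocNe (l : List ((String × String) × Int)) (e : (String × String) × Int)
    (c' : String) (h : e.1.1 ≠ c') : pvRow (l ++ [e]) c' = pvRow l c' := by
  have h2 : ∀ t : String, (e.1 == (c', t)) = false := by
    intro t
    simp only [beq_eq_false_iff_ne, ne_eq]
    intro hh; exact h (by rw [hh])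
  unfold pvRow
  simp [List.filter_append, h, h2]

theorem pvRowSnoc (l : List ((String × String) × Int)) (c n : String) (w : Int) :
    ((PySem.Dict.mk (pvRow l c)).insert n ((PySem.Dict.mk (pvRow l c)).getD n 0 + w)).items
      = pvRow (l ++ [((c, n), w)]) c := by
  have hT : (PySem.Dict.mk (pvRow l c)).keys
      = PySem.Set.ofList ((l.filter (fun e => e.1.1 == c)).map (fun e => e.1.2)) := by
    simp [PySem.Dict.keys, pvRow, List.map_map, Function.comp_def]
  have hTnodup : (PySem.Dict.mk (pvRow l c)).keys.Nodup := by
    rw [hT]; exact PySem.Set.nodup_ofList _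
  have hfilter : (l ++ [((c, n), w)]).filter (fun e => e.1.1 == c)
      = l.filter (fun e => e.1.1 == c) ++ [((c, n), w)] := by
    simp [List.filter_append]
  have hsum_ne : ∀ t : String, t ≠ n →
      ((l ++ [((c, n), w)]).filter (fun e => e.1 == (c, t))).map (fun e => e.2)
        = (l.filter (fun e => e.1 == (c, t))).map (fun e => e.2) := by
    intro t ht
    simp [List.filter_append, Prod.ext_iff, ht.symm]
  have hsum_n :
      (((l ++ [((c, n), w)]).filter (fun e => e.1 == (c, n))).map (fun e => e.2)).sum
        = ((l.filter (fun e => e.1 == (c, n))).map (fun e => e.2)).sum + w := by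
    simp [List.filter_append]
  by_cases hn : n ∈ PySem.Set.ofList ((l.filter (fun e => e.1.1 == c)).map (fun e => e.1.2))
  · -- n is an existing target
    have hcont : (PySem.Dict.mk (pvRow l c)).contains n = true := by
      rw [PySem.Dict.contains_eq_decide_mem_keys, hT]; exact decide_eq_true hn
    have hmem : (n, ((l.filter (fun e => e.1 == (c, n))).map (fun e => e.2)).sum)
        ∈ (PySem.Dict.mk (pvRow l c)).items := by
      show _ ∈ pvRow l c
      exact List.mem_map.mpr ⟨n, hn, rfl⟩
    have hgetD := PySem.Dict.getD_of_mem_items _ hmem hTnodup 0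
    rw [PySem.Dict.items_insert_of_contains _ _ hcont, hgetD]
    show (pvRow l c).map _ = _
    unfold pvRow
    rw [hfilter]
    simp only [List.map_append, List.map_cons, List.map_nil]
    rw [pvOfListSnoc, pvAddOfMem _ _ (by simpa using hn), List.map_map]
    apply List.map_congr_left
    intro t htmem
    by_cases ht : t = n
    · subst ht
      simp only [Function.comp, beq_self_eq_true, if_true]
      rw [hsum_n]
    · have hbt : (t == n) = false := beq_eq_false_iff_ne.mpr ht
      simp only [Function.comp, hbt, Bool.false_eq_true, if_false]
      rw [hsum_ne t ht]
  · -- n is a new target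
    have hcont : (PySem.Dict.mk (pvRow l c)).contains n = false := by
      rw [PySem.Dict.contains_eq_decide_mem_keys, hT]; exact decide_eq_false hn
    have hgetD : (PySem.Dict.mk (pvRow l c)).getD n 0 = 0 :=
      PySem.Dict.getD_of_not_contains _ _ hcont
    rw [PySem.Dict.items_insert_of_not_contains _ _ hcont, hgetD]
    show pvRow l c ++ _ = _
    unfold pvRow
    rw [hfilter]
    simp only [List.map_append, List.map_cons, List.map_nil]
    rw [pvOfListSnoc, pvAddOfNotMem _ _ (by simpa using hn), List.map_append]
    congr 1
    · apply List.map_congr_left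
      intro t htmem
      have ht : t ≠ n := fun hh => hn (by rw [← hh]; simpa using htmem)
      rw [hsum_ne t ht]
    · have h0 : l.filter (fun e => e.1 == (c, n)) = [] :=
        pvFilterNil2' l c n (by simpa using hn)
      simp [List.filter_append, List.filter_cons, h0]

theorem pvMain (evs : List ((String × String) × Int)) : (pvFold evs).items = pvCanon evs := by
  induction evs using List.reverseRecOn with
  | nil => rfl
  | append_singleton l e ih =>
    obtain ⟨⟨c, n⟩, w⟩ := e
    have hstep : pvFold (l ++ [((c, n), w)]) = pvAStep (pvFold l) c n w := by
      unfold pvFold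
      rw [List.foldl_append]
      rfl
    have hkeys : (pvFold l).keys = PySem.Set.ofList (l.map (fun e => e.1.1)) := by
      show (pvFold l).items.map Prod.fst = _
      rw [ih]
      unfold pvCanon
      rw [List.map_map]
      simp [Function.comp_def]
    have hnodup : (pvFold l).keys.Nodup := by
      rw [hkeys]; exact PySem.Set.nodup_ofList _
    have hcanon_snoc : pvCanon (l ++ [((c, n), w)])
        = (PySem.Set.ofList (l.map (fun e => e.1.1)) |>.add c).map
            (fun c' => (c', PySem.Dict.mk (pvRow (l ++ [((c, n), w)]) c'))) := by
      unfold pvCanon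
      simp only [List.map_append, List.map_cons, List.map_nil]
      rw [pvOfListSnoc]
    rw [hstep, hcanon_snoc]
    by_cases hc : c ∈ l.map (fun e => e.1.1)
    · -- existing source state
      have hcS : c ∈ PySem.Set.ofList (l.map (fun e => e.1.1)) :=
        (PySem.Set.mem_ofList _ _).mpr hc
      have hcont : (pvFold l).contains c = true := by
        rw [PySem.Dict.contains_eq_decide_mem_keys, hkeys]; exact decide_eq_true hcS
      have hmem : (c, PySem.Dict.mk (pvRow l c)) ∈ (pvFold l).items := by
        rw [ih]; exact List.mem_map.mpr ⟨c, hcS, rfl⟩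
      have hgetD := PySem.Dict.getD_of_mem_items _ hmem hnodup PySem.Dict.empty
      rw [pvAStep, if_pos hcont, PySem.Dict.items_insert_of_contains _ _ hcont, ih, hgetD,
        pvAddOfMem _ _ hcS]
      unfold pvCanon
      rw [List.map_map]
      apply List.map_congr_left
      intro c' hc'
      by_cases hcc : c' = c
      · subst hcc
        simp only [Function.comp, beq_self_eq_true, if_true]
        refine congrArg (fun z => (c', z)) ?_
        apply PySem.Dict.ext
        exact pvRowSnoc l c' n w
      · have hbc : (c' == c) = false := beq_eq_false_iff_ne.mpr hcc
        simp only [Function.comp, hbc, Bool.false_eq_true, if_false]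
        rw [pvRowSnocNe l _ c' (by simpa using Ne.symm hcc)]
    · -- new source state
      have hcS : ¬ c ∈ PySem.Set.ofList (l.map (fun e => e.1.1)) := by
        rw [PySem.Set.mem_ofList]; exact hc
      have hcont : (pvFold l).contains c = false := by
        rw [PySem.Dict.contains_eq_decide_mem_keys, hkeys]; exact decide_eq_false hcS
      rw [pvAStep, if_neg (by simp [hcont]), PySem.Dict.items_insert_of_not_contains _ _ hcont,
        ih, pvAddOfNotMem _ _ hcS, List.map_append]
      congr 1
      · unfold pvCanon
        apply List.map_congr_left
        intro c' hc'
        have hcc : c' ≠ c := fun hh => hcS (hh ▸ hc')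
        rw [pvRowSnocNe l _ c' (by simpa using Ne.symm hcc)]
      · simp only [List.map_cons, List.map_nil]
        have h1 : pvRow (l ++ [((c, n), w)]) c = [(n, w)] := by
          unfold pvRow
          rw [List.filter_append, pvFilterNil1 l c hc]
          simp [pvFilterNil2 l c n hc, PySem.Set.ofList, PySem.Set.add,
            PySem.Set.empty]
        rw [h1]
        rfl

-- ===== VERDICT (by name: the statement is the Claim_ definition above) =====
theorem build_transition_dict_spec : Claim_equal_build_transition_dict := by
  intro seq incl _hdom
  unfold Spec_build_transition_dict
  rw [pvAShape, pvBShape, pvMain]
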